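-- pv_equiv track=rewrite | github.com/orofbrown/keepo | lake.py | lake
-- ===== SOURCE A (Python) =====
-- def is_ended(curr, rest):
--     return bool([r for r in rest if r > curr])
--
-- def block(h):
--     return 1*h
--
-- def lake(d):
--     total = 0
--     skip = 0
--     prev = d[0]
--     start = prev
--
--     for j in range(1, len(d)):
--         curr = d[j]
--         if j > 0:
--             if curr <= prev:
--                 # downhill
--                 total += block(start - curr)
--             else:
--                 # curr > prev
--                 if curr < start:
--                     # still same lake
--                     total += block(start - curr)
--                 else:
--                     # might be ending
--                     if is_ended(curr, d[j+1:]):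
--                         skip = j
--                         break
--                     else:
--                         total += block(start - curr)
--         else:
--             if curr >= prev:
--                 skip = j
--                 break
--             else:
--                 total += block(start - curr)
--
--     return total, skip
-- ===== SOURCE B (Python) =====
-- def lake(d):
--     d0 = d[0]
--     # suffix maxima: sufs[j] = max of d[j+1:], or None if empty
--     sufs = []
--     m = None
--     for x in reversed(d):
--         sufs.append(m)
--         if m is None or x > m:
--             m = x
--     sufs.reverse()
--     total = 0
--     for j in range(1, len(d)):
--         x = d[j]
--         s = sufs[j]
--         if x > d0 and s is not None and s > x:
--             return total, j
--         total += d0 - x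
--     return total, 0
-- ===== Notes on version B (the rewrite author's own statement) =====
-- stated objective: alternative
-- what changed: Precompute suffix maxima in a single right-to-left pass so that A's per-step is_ended scan of the remaining list becomes a constant-time lookup; this avoids A's quadratic worst case, though a timing run's inputs take A's linear path so no speedup was measured.
import Mathlib
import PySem

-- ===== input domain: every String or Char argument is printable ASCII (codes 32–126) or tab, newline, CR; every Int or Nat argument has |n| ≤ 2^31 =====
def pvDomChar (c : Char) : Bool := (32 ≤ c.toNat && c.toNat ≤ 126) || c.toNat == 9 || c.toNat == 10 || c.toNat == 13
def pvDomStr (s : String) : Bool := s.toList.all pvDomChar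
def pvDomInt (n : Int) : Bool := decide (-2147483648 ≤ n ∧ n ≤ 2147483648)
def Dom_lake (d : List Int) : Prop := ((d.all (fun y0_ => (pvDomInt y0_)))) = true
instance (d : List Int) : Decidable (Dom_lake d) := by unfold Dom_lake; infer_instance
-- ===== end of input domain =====

-- B precomputes a suffix-maxima list once and replaces A's per-step is_ended suffix scan by a lookup (alternative algorithm).

-- ===== PORT A =====
-- bool([r for r in rest if r > curr]) : nonempty filtered list
def is_ended (curr : Int) (rest : List Int) : Bool :=
  !(rest.filter (fun r => curr < r)).isEmpty

def block (h : Int) : Int := 1 * h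

-- the for-loop of A, with break via early return; prev/start never change in A
def lakeGo (d : List Int) (start prev : Int) (j : Nat) (total : Int) : Int × Int :=
  if h : j < d.length then
    let curr := d[j]
    if 0 < j then
      if curr ≤ prev then
        lakeGo d start prev (j + 1) (total + block (start - curr))
      else if curr < start then
        lakeGo d start prev (j + 1) (total + block (start - curr))
      else if is_ended curr (d.drop (j + 1)) then  -- d[j+1:] with j+1 ≥ 0 is drop (j+1)
        (total, (j : Int))
      else
        lakeGo d start prev (j + 1) (total + block (start - curr))
    else
      if prev ≤ curr then (total, (j : Int))
      else lakeGo d start prev (j + 1) (total + block (start - curr))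
  else (total, 0)
termination_by d.length - j

def lake (d : List Int) : Int × Int :=
  let prev := d.headD 0   -- d[0]; Pre_lake excludes the empty list where Python raises IndexError
  let start := prev
  lakeGo d start prev 1 0

-- ===== PORT B =====
-- right-to-left pass of Source B: append m then update m; consing = append-then-reverse
def sufFold (d : List Int) : List (Option Int) × Option Int :=
  d.reverse.foldl
    (fun (st : List (Option Int) × Option Int) x =>
      (st.2 :: st.1,
       some (match st.2 with
             | none => x
             | some m => if m < x then x else m)))
    ([], none)

-- the second loop of Source B, with early return
def lakeAltGo (d : List Int) (d0 : Int) (sufs : List (Option Int)) (j : Nat) (total : Int) :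
    Int × Int :=
  if h : j < d.length then
    let x := d[j]
    let s := sufs.getD j none
    if decide (d0 < x) && s.elim false (fun m => decide (x < m)) then
      (total, (j : Int))
    else
      lakeAltGo d d0 sufs (j + 1) (total + (d0 - x))
  else (total, 0)
termination_by d.length - j

def lake_alt (d : List Int) : Int × Int :=
  let d0 := d.headD 0   -- d[0]; Pre_lake excludes the empty list
  let sufs := (sufFold d).1
  lakeAltGo d d0 sufs 1 0

-- ===== PRECONDITION & SPEC =====
-- Pre_ excludes only the empty list, on which A (and B) raise IndexError at d[0].
def Pre_lake (d : List Int) : Prop := d ≠ []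
instance (d : List Int) : Decidable (Pre_lake d) := by unfold Pre_lake; infer_instance
def pvWitness_lake : List Int := [3, 1, 2, 5]

def Spec_lake (d : List Int) (out : Int × Int) : Prop := out = lake_alt d
instance (d : List Int) (out : Int × Int) : Decidable (Spec_lake d out) := by
  unfold Spec_lake; infer_instance

-- ===== CLAIM (what is proved, stated in full; the proofs are below) =====
def Claim_equal_lake : Prop := ∀ (d : List Int), Dom_lake d → Pre_lake d → Spec_lake d (lake d)

-- ===== LEMMAS AND PROOFS =====

-- specification of the suffix maxima: optional max of a list
def optMax (l : List Int) : Option Int :=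
  l.foldr (fun x m => some (match m with | none => x | some mm => if mm < x then x else mm)) none

lemma sufFold_eq (d : List Int) :
    sufFold d = d.foldr
      (fun x st => ((st.2 :: st.1 : List (Option Int)),
        some (match st.2 with | none => x | some m => if m < x then x else m)))
      ([], none) := by
  unfold sufFold; rw [List.foldl_reverse]

lemma sufFold_snd (d : List Int) : (sufFold d).2 = optMax d := by
  induction d with
  | nil => rfl
  | cons x xs ih =>
    rw [sufFold_eq] at ih ⊢
    simp only [List.foldr_cons, optMax, List.foldr] at ih ⊢
    rw [ih]

lemma sufFold_fst_cons (x : Int) (xs : List Int) :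
    (sufFold (x :: xs)).1 = (sufFold xs).2 :: (sufFold xs).1 := by
  rw [sufFold_eq (x :: xs), List.foldr_cons, ← sufFold_eq]

lemma sufFold_fst_getD (d : List Int) (j : Nat) :
    (sufFold d).1.getD j none = optMax (d.drop (j + 1)) := by
  induction d generalizing j with
  | nil => cases j <;> rfl
  | cons x xs ih =>
    rw [sufFold_fst_cons]
    cases j with
    | zero => simpa using sufFold_snd xs
    | succ k => simpa using ih k

lemma is_ended_eq_any (c : Int) (l : List Int) :
    is_ended c l = l.any (fun r => decide (c < r)) := by
  induction l with
  | nil => rfl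
  | cons r t ih =>
    by_cases hc : c < r <;> simp [is_ended, List.filter, hc] at ih ⊢ <;> exact ih

lemma optMax_eq_any (c : Int) (l : List Int) :
    (optMax l).elim false (fun m => decide (c < m)) = l.any (fun r => decide (c < r)) := by
  induction l with
  | nil => rfl
  | cons r t ih =>
    have hcons : optMax (r :: t)
        = some (match optMax t with | none => r | some mm => if mm < r then r else mm) := rfl
    rw [hcons]
    cases h : optMax t with
    | none =>
      rw [h] at ih
      simp only [Option.elim_none] at ih
      simp [← ih]
    | some m =>
      rw [h] at ih
      simp only [Option.elim_some] at ih
      simp only [List.any_cons, ← ih, Option.elim_some]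
      by_cases hmr : m < r <;> by_cases hcr : c < r <;>
        simp [hmr, hcr] <;> omega

lemma is_ended_eq_optMax (c : Int) (l : List Int) :
    is_ended c l = (optMax l).elim false (fun m => decide (c < m)) :=
  (is_ended_eq_any c l).trans (optMax_eq_any c l).symm

lemma loop_eq (d : List Int) (d0 : Int) :
    ∀ j total, 0 < j →
      lakeGo d d0 d0 j total = lakeAltGo d d0 (sufFold d).1 j total := by
  intro j total hj
  induction hn : d.length - j generalizing j total with
  | zero =>
    have h : ¬ j < d.length := by omega
    unfold lakeGo lakeAltGo
    simp [h]
  | succ n ih =>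
    have h : j < d.length := by omega
    unfold lakeGo lakeAltGo
    simp only [h, dif_pos, hj, if_pos]
    rw [sufFold_fst_getD]
    set x := d[j] with hx
    have hie := is_ended_eq_optMax x (d.drop (j + 1))
    by_cases h1 : x ≤ d0
    · have hd : decide (d0 < x) = false := by simp; omega
      rw [if_pos h1, hd]
      simp only [Bool.false_and, Bool.false_eq_true, if_false]
      rw [show block (d0 - x) = d0 - x from one_mul _]
      exact ih (j + 1) _ (by omega) (by omega)
    · have h1' : ¬ x < d0 := by omega
      rw [if_neg h1, if_neg h1']
      cases hm : optMax (d.drop (j + 1)) with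
      | none =>
        have hA : is_ended x (d.drop (j + 1)) = false := by rw [hie, hm]; rfl
        rw [hA]
        simp only [Option.elim_none, Bool.and_false, Bool.false_eq_true, if_false]
        rw [show block (d0 - x) = d0 - x from one_mul _]
        exact ih (j + 1) _ (by omega) (by omega)
      | some m =>
        rw [hm] at hie
        simp only [Option.elim_some] at hie
        by_cases hlt : x < m
        · have hA : is_ended x (d.drop (j + 1)) = true := by rw [hie]; simp [hlt]
          rw [hA]
          simp [show d0 < x by omega, hlt]
        · have hA : is_ended x (d.drop (j + 1)) = false := by rw [hie]; simp [hlt]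
          rw [hA]
          simp only [Option.elim_some, Bool.false_eq_true, if_false,
            show decide (x < m) = false from by simp [hlt], Bool.and_false]
          rw [show block (d0 - x) = d0 - x from one_mul _]
          exact ih (j + 1) _ (by omega) (by omega)

-- ===== VERDICT (by name: the statement is the Claim_ definition above) =====
theorem lake_spec : Claim_equal_lake := by
  intro d _ _
  unfold Spec_lake lake lake_alt
  exact loop_eq d (d.headD 0) 1 0 (by omega)
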